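-- pv_equiv track=rewrite | github.com/ASSERT-KTH/Mokav | experiments/pynguin/c4b/return-lst/generated_tests/src_1168/4/src_1168.py | func
-- ===== SOURCE A (Python) =====
-- def func(*args):
-- 	ret_values = []
--
-- 	a = int(args[0])
-- 	b = int(args[1])
-- 	c = int(args[2])
-- 	while (((a * 4) > c) or ((a * 2) > b)):
-- 	    a = (a - 1)
-- 	ret_values.append(((a + (a * 2)) + (a * 4)))
--
-- 	return ret_values
-- ===== SOURCE B (Python) =====
-- def func(*args):
--     a = int(args[0])
--     b = int(args[1])
--     c = int(args[2])
--     return [7 * min(a, c // 4, b // 2)]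
-- ===== Notes on version B (the rewrite author's own statement) =====
-- stated objective: faster
-- what changed: Replaces the decrement-until-bounds-hold loop by the closed form min(a, c//4, b//2) and returns 7 times it directly.
import Mathlib
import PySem

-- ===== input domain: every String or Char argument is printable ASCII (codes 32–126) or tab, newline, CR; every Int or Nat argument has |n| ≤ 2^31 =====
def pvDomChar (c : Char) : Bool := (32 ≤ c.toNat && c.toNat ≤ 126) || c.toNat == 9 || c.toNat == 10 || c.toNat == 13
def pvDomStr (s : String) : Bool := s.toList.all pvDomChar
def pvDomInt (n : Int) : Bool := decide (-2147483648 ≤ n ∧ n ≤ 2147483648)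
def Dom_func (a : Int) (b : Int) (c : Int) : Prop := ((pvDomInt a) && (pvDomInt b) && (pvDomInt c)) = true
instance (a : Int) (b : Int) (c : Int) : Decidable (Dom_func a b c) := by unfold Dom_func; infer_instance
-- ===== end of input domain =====

-- B replaces A's decrement-until-bounds-hold loop by the closed form min(a, c//4, b//2); asymptotically faster.

-- ===== PORT A =====
-- the while loop of A: decrement a while 4*a > c or 2*a > b
def funcLoop (a : Int) (b : Int) (c : Int) : Int :=
  if a * 4 > c ∨ a * 2 > b then funcLoop (a - 1) b c else a
termination_by (a - min (PySem.Int.floordiv c 4) (PySem.Int.floordiv b 2)).toNat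
decreasing_by
  rename_i h
  have h4 : PySem.Int.floordiv c 4 < a ∨ PySem.Int.floordiv b 2 < a := by
    rcases h with h | h
    · exact Or.inl ((PySem.Int.floordiv_lt_iff_lt_mul (by norm_num)).mpr (by linarith))
    · exact Or.inr ((PySem.Int.floordiv_lt_iff_lt_mul (by norm_num)).mpr (by linarith))
  have : min (PySem.Int.floordiv c 4) (PySem.Int.floordiv b 2) < a := by
    rcases h4 with h | h
    · exact lt_of_le_of_lt (min_le_left _ _) h
    · exact lt_of_le_of_lt (min_le_right _ _) h
  omega

def func (a : Int) (b : Int) (c : Int) : List Int :=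
  let a' := funcLoop a b c
  [(a' + a' * 2) + a' * 4]

-- ===== PORT B =====
def func_alt (a : Int) (b : Int) (c : Int) : List Int :=
  [7 * min a (min (PySem.Int.floordiv c 4) (PySem.Int.floordiv b 2))]

-- ===== PRECONDITION & SPEC =====
def Spec_func (a : Int) (b : Int) (c : Int) (out : List Int) : Prop := out = func_alt a b c
instance (a : Int) (b : Int) (c : Int) (out : List Int) : Decidable (Spec_func a b c out) := by unfold Spec_func; infer_instance

-- ===== CLAIM (what is proved, stated in full; the proofs are below) =====
def Claim_equal_func : Prop := ∀ (a : Int) (b : Int) (c : Int), Dom_func a b c → Spec_func a b c (func a b c)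

-- ===== LEMMAS AND PROOFS =====
theorem funcLoop_eq (a b c : Int) :
    funcLoop a b c = min a (min (PySem.Int.floordiv c 4) (PySem.Int.floordiv b 2)) := by
  unfold funcLoop
  split
  · rename_i h
    have h4 : PySem.Int.floordiv c 4 < a ∨ PySem.Int.floordiv b 2 < a := by
      rcases h with h | h
      · exact Or.inl ((PySem.Int.floordiv_lt_iff_lt_mul (by norm_num)).mpr (by linarith))
      · exact Or.inr ((PySem.Int.floordiv_lt_iff_lt_mul (by norm_num)).mpr (by linarith))
    have hm : min (PySem.Int.floordiv c 4) (PySem.Int.floordiv b 2) < a := by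
      rcases h4 with h | h
      · exact lt_of_le_of_lt (min_le_left _ _) h
      · exact lt_of_le_of_lt (min_le_right _ _) h
    rw [funcLoop_eq (a - 1) b c]
    omega
  · rename_i h
    push Not at h
    have h1 : a ≤ PySem.Int.floordiv c 4 :=
      (PySem.Int.le_floordiv_iff_mul_le (by norm_num)).mpr h.1
    have h2 : a ≤ PySem.Int.floordiv b 2 :=
      (PySem.Int.le_floordiv_iff_mul_le (by norm_num)).mpr h.2
    omega
termination_by (a - min (PySem.Int.floordiv c 4) (PySem.Int.floordiv b 2)).toNat
decreasing_by
  rename_i h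
  have h4 : PySem.Int.floordiv c 4 < a ∨ PySem.Int.floordiv b 2 < a := by
    rcases h with h | h
    · exact Or.inl ((PySem.Int.floordiv_lt_iff_lt_mul (by norm_num)).mpr (by linarith))
    · exact Or.inr ((PySem.Int.floordiv_lt_iff_lt_mul (by norm_num)).mpr (by linarith))
  have : min (PySem.Int.floordiv c 4) (PySem.Int.floordiv b 2) < a := by
    rcases h4 with h | h
    · exact lt_of_le_of_lt (min_le_left _ _) h
    · exact lt_of_le_of_lt (min_le_right _ _) h
  omega

-- ===== VERDICT (by name: the statement is the Claim_ definition above) =====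
theorem func_spec : Claim_equal_func := by
  intro a b c _
  unfold Spec_func func func_alt
  rw [funcLoop_eq]
  ring_nf
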